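-- pv_equiv track=rewrite | github.com/vijaysattigeri/jiosaavndownloader | jiosaavndownloader/downloader.py | getLegalPathString
-- ===== SOURCE A (Python) =====
-- def getLegalPathString(a_path_str):
--     # Define replacements here
--     # Format: "_char_<char_name>_"
--     substitutes = {
--         # Linux/Unix/Mac
--         "/"  : "_char_fslash_",
--         "\\" : "_char_bslash_",
--
--         # Windows
--         "<"  : "_char_lt_",
--         ">"  : "_char_gt_",
--         ":"  : "_char_colon_",
--         "\"" : "_char_dquote_",
--         "|"  : "_char_pipe_",
--         "?"  : "_char_question_",
--         "*"  : "_char_asterisk_"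
--     }
--
--     for k, v in substitutes.items():
--         a_path_str = a_path_str.replace(k, v)
--
--     return a_path_str
-- ===== SOURCE B (Python) =====
-- def getLegalPathString(a_path_str):
--     substitutes = {
--         # Linux/Unix/Mac
--         "/"  : "_char_fslash_",
--         "\\" : "_char_bslash_",
--
--         # Windows
--         "<"  : "_char_lt_",
--         ">"  : "_char_gt_",
--         ":"  : "_char_colon_",
--         "\"" : "_char_dquote_",
--         "|"  : "_char_pipe_",
--         "?"  : "_char_question_",
--         "*"  : "_char_asterisk_"
--     }
--     # one pass: emit each character's replacement (or the character itself)
--     return "".join(substitutes.get(c, c) for c in a_path_str)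
-- ===== Notes on version B (the rewrite author's own statement) =====
-- stated objective: simpler
-- what changed: Replaces nine sequential whole-string .replace passes by a single character-wise pass that joins each character's replacement looked up in the same dict (valid because no replacement value contains any key character).
import Mathlib
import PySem

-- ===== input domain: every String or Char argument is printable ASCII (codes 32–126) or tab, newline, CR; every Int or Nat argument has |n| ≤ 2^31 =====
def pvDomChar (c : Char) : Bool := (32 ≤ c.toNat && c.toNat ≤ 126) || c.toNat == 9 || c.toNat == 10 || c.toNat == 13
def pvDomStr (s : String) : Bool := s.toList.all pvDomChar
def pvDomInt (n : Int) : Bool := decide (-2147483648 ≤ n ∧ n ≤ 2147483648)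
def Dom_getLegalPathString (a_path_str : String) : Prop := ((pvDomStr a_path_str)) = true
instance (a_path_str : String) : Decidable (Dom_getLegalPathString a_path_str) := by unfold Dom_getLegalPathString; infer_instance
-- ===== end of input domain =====

-- B replaces nine sequential whole-string .replace passes by a single character-wise
-- pass joining each character's replacement from the same dict (simpler; exact because
-- no replacement value contains any key character).


-- ===== PORT A =====
-- nine sequential `str.replace` passes, in the dict's insertion order
def getLegalPathString (a_path_str : String) : String :=
  let s1 := PySem.Str.replace a_path_str "/" "_char_fslash_"
  let s2 := PySem.Str.replace s1 "\\" "_char_bslash_"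
  let s3 := PySem.Str.replace s2 "<" "_char_lt_"
  let s4 := PySem.Str.replace s3 ">" "_char_gt_"
  let s5 := PySem.Str.replace s4 ":" "_char_colon_"
  let s6 := PySem.Str.replace s5 "\"" "_char_dquote_"
  let s7 := PySem.Str.replace s6 "|" "_char_pipe_"
  let s8 := PySem.Str.replace s7 "?" "_char_question_"
  PySem.Str.replace s8 "*" "_char_asterisk_"

-- ===== PORT B =====
-- the same substitution dict, keyed by the single character each key consists of
def pvSubstitutes : PySem.Dict Char String :=
  PySem.Dict.ofList
    [('/', "_char_fslash_"), ('\\', "_char_bslash_"),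
     ('<', "_char_lt_"), ('>', "_char_gt_"), (':', "_char_colon_"),
     ('"', "_char_dquote_"), ('|', "_char_pipe_"), ('?', "_char_question_"),
     ('*', "_char_asterisk_")]

-- "".join(substitutes.get(c, c) for c in a_path_str)
def getLegalPathString_alt (a_path_str : String) : String :=
  PySem.Str.join ""
    (a_path_str.toList.map (fun c => PySem.Dict.getD pvSubstitutes c (String.ofList [c])))

-- ===== PRECONDITION & SPEC =====
def Spec_getLegalPathString (a_path_str : String) (out : String) : Prop := out = getLegalPathString_alt a_path_str
instance (a_path_str : String) (out : String) : Decidable (Spec_getLegalPathString a_path_str out) := by unfold Spec_getLegalPathString; infer_instance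

-- ===== CLAIM (what is proved, stated in full; the proofs are below) =====
def Claim_equal_getLegalPathString : Prop := ∀ (a_path_str : String), Dom_getLegalPathString a_path_str → Spec_getLegalPathString a_path_str (getLegalPathString a_path_str)

-- ===== LEMMAS AND PROOFS =====

-- Python's str.replace with a single-character pattern is a character-wise flatMap.
theorem pv_go_single (k : Char) (v : List Char) :
    ∀ (l acc : List Char) (fuel : Nat), l.length ≤ fuel →
      PySem.Chars.replace.go [k] v fuel l acc
        = acc.reverse ++ l.flatMap (fun c => if c = k then v else [c]) := by
  intro l
  induction l with
  | nil =>
    intro acc fuel _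
    cases fuel <;> simp [PySem.Chars.replace.go]
  | cons c t ih =>
    intro acc fuel hf
    cases fuel with
    | zero => simp at hf
    | succ n =>
      rw [PySem.Chars.replace.go]
      by_cases hc : c = k
      · subst hc
        have hp : [c].isPrefixOf (c :: t) = true := by simp [List.isPrefixOf]
        simp only [hp]
        rw [List.length_cons] at hf
        rw [show List.drop [c].length (c :: t) = t from rfl,
            ih (v.reverse ++ acc) n (by omega)]
        simp
      · have hp : [k].isPrefixOf (c :: t) = false := by
          simp [List.isPrefixOf]; exact fun h => hc h.symm
        simp only [hp, Bool.false_eq_true, if_false]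
        rw [List.length_cons] at hf
        rw [ih (c :: acc) n (by omega)]
        simp [hc]

theorem pv_replace_single (k : Char) (v l : List Char) :
    PySem.Chars.replace l [k] v = l.flatMap (fun c => if c = k then v else [c]) := by
  rw [PySem.Chars.replace]
  simp [pv_go_single k v l [] l.length (le_refl _)]

-- joining with "" concatenates
theorem pv_join_empty (l : List (List Char)) : PySem.Chars.join [] l = l.flatten := by
  induction l with
  | nil => rw [PySem.Chars.join_nil]; rfl
  | cons a t ih =>
    cases t with
    | nil => simp [PySem.Chars.join_singleton]
    | cons b u => rw [PySem.Chars.join_cons_cons, List.flatten_cons, ih]; simp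

-- B's per-character substitution, on char lists
def pvSubst (c : Char) : List Char :=
  (PySem.Dict.getD pvSubstitutes c (String.ofList [c])).toList

-- A's nine single-char replaces collapse, character by character, to B's lookup
theorem pv_char_eq (c : Char) :
    ((((((((((if c = '/' then "_char_fslash_".toList else [c]).flatMap
      (fun d => if d = '\\' then "_char_bslash_".toList else [d])).flatMap
      (fun d => if d = '<' then "_char_lt_".toList else [d])).flatMap
      (fun d => if d = '>' then "_char_gt_".toList else [d])).flatMap
      (fun d => if d = ':' then "_char_colon_".toList else [d])).flatMap
      (fun d => if d = '"' then "_char_dquote_".toList else [d])).flatMap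
      (fun d => if d = '|' then "_char_pipe_".toList else [d])).flatMap
      (fun d => if d = '?' then "_char_question_".toList else [d])).flatMap
      (fun d => if d = '*' then "_char_asterisk_".toList else [d]))) = pvSubst c := by
  by_cases h1 : c = '/'; · subst h1; decide
  by_cases h2 : c = '\\'; · subst h2; decide
  by_cases h3 : c = '<'; · subst h3; decide
  by_cases h4 : c = '>'; · subst h4; decide
  by_cases h5 : c = ':'; · subst h5; decide
  by_cases h6 : c = '"'; · subst h6; decide
  by_cases h7 : c = '|'; · subst h7; decide
  by_cases h8 : c = '?'; · subst h8; decide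
  by_cases h9 : c = '*'; · subst h9; decide
  unfold pvSubst
  rw [show pvSubstitutes = PySem.Dict.mk
        [('/', "_char_fslash_"), ('\\', "_char_bslash_"),
         ('<', "_char_lt_"), ('>', "_char_gt_"), (':', "_char_colon_"),
         ('"', "_char_dquote_"), ('|', "_char_pipe_"), ('?', "_char_question_"),
         ('*', "_char_asterisk_")] from by decide]
  simp [h1, h2, h3, h4, h5, h6, h7, h8, h9, PySem.Dict.getD,
        PySem.Dict.get?, beq_iff_eq,
        Ne.symm h1, Ne.symm h2, Ne.symm h3, Ne.symm h4,
        Ne.symm h5, Ne.symm h6, Ne.symm h7, Ne.symm h8, Ne.symm h9, String.toList_ofList]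

-- the composed nine flatMaps equal a single flatMap of pvSubst
theorem pv_chain (l : List Char) :
    ((((((((l.flatMap (fun d => if d = '/' then "_char_fslash_".toList else [d])).flatMap
      (fun d => if d = '\\' then "_char_bslash_".toList else [d])).flatMap
      (fun d => if d = '<' then "_char_lt_".toList else [d])).flatMap
      (fun d => if d = '>' then "_char_gt_".toList else [d])).flatMap
      (fun d => if d = ':' then "_char_colon_".toList else [d])).flatMap
      (fun d => if d = '"' then "_char_dquote_".toList else [d])).flatMap
      (fun d => if d = '|' then "_char_pipe_".toList else [d])).flatMap
      (fun d => if d = '?' then "_char_question_".toList else [d])).flatMap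
      (fun d => if d = '*' then "_char_asterisk_".toList else [d]) = l.flatMap pvSubst := by
  induction l with
  | nil => simp
  | cons c t ih =>
    simp only [List.flatMap_cons, List.flatMap_append]
    rw [ih, ← pv_char_eq c]

-- ===== VERDICT (by name: the statement is the Claim_ definition above) =====
theorem getLegalPathString_spec : Claim_equal_getLegalPathString := by
  intro s _
  unfold Spec_getLegalPathString getLegalPathString getLegalPathString_alt
  apply String.toList_injective
  simp only [PySem.Str.replace, PySem.Str.toList_join, String.toList_ofList]
  rw [show ("" : String).toList = [] from rfl, pv_join_empty]
  rw [show ("/" : String).toList = ['/'] from rfl,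
      show ("\\" : String).toList = ['\\'] from rfl,
      show ("<" : String).toList = ['<'] from rfl,
      show (">" : String).toList = ['>'] from rfl,
      show (":" : String).toList = [':'] from rfl,
      show ("\"" : String).toList = ['"'] from rfl,
      show ("|" : String).toList = ['|'] from rfl,
      show ("?" : String).toList = ['?'] from rfl,
      show ("*" : String).toList = ['*'] from rfl]
  simp only [pv_replace_single]
  rw [pv_chain s.toList, List.map_map]
  rw [show (String.toList ∘ fun c => PySem.Dict.getD pvSubstitutes c (String.ofList [c]))
        = pvSubst from rfl]
  exact List.flatMap_def
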